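-- pv_equiv track=rewrite | github.com/yhs3434/Algorithms | baekjun/stage solve/20.stack/1874.py | solution
-- ===== SOURCE A (Python) =====
-- def solution(n, prog):
--     answer = []
--     st = []
--     cntp = 0
--     cntm = 0
--     j = 0
--     for i in range(1, n+1):
--         while st and j < n and prog[j] == st[-1]:
--             st.pop()
--             answer.append('-')
--             cntm += 1
--             j += 1
--         st.append(i)
--         answer.append('+')
--         cntp += 1
--     while st and j < n and prog[j] == st[-1]:
--         st.pop()
--         answer.append('-')
--         cntm += 1
--         j += 1
--     if cntm == cntp:
--         return answer
--     else:
--         return []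
-- ===== SOURCE B (Python) =====
-- def solution(n, prog):
--     # Stackless: the pop sequence is realizable iff each target t is fresh, in
--     # range 1..n, and every value strictly between t and the running maximum m
--     # was already popped; the output is then forced: (t-m) pushes when t is a
--     # new maximum, followed by one pop.
--     answer = []
--     seen = set()
--     m = 0
--     for j in range(n):
--         t = prog[j]
--         if t < 1 or t > n or t in seen:
--             return []
--         if any(v not in seen for v in range(t + 1, m + 1)):
--             return []
--         seen.add(t)
--         if t > m:
--             answer.extend('+' * (t - m))
--             m = t
--         answer.append('-')
--     return answer
-- ===== Notes on version B (the rewrite author's own statement) =====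
-- stated objective: alternative
-- what changed: B drops the stack entirely: it validates each target by a membership criterion (fresh, in 1..n, and every value between it and the running maximum already popped, kept in a set) and emits the forced output directly from running-maximum differences, instead of A's explicit stack simulation over 1..n with push/pop counters.
-- outside the precondition, e.g. on solution(2, [5]): A returns [], B returns []
import Mathlib
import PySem

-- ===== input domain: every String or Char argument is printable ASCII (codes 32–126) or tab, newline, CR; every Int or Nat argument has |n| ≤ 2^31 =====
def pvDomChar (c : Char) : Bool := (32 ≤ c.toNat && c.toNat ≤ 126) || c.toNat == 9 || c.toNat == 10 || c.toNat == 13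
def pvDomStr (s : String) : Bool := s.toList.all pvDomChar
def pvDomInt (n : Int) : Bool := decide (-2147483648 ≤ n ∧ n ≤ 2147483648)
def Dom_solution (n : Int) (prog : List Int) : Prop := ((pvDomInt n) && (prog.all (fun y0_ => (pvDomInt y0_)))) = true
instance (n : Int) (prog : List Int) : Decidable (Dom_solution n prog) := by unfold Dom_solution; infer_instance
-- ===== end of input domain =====

-- B is stackless: it validates each target by a set-membership criterion and emits the forced
-- output from running-maximum differences, instead of A's explicit stack simulation over 1..n.
-- Equivalence is proved on Pre_ (enough targets); outside Pre_ both Pythons can raise IndexError.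

-- ===== PORT A =====
-- Python's list used as a stack (append / st[-1] / pop at the end) is kept top-at-head here.
-- A's inner 'while st and j < n and prog[j] == st[-1]' loop:
def popA (prog : List Int) (n : Int) : List Int → List String → Int → Int → (List Int × List String × Int × Int)
  | [], ans, cntm, j => ([], ans, cntm, j)
  | a :: st, ans, cntm, j =>
    if j < n then
      match PySem.List.pyGet? prog j with
      | some p =>
        if p = a then popA prog n st (ans ++ ["-"]) (cntm + 1) (j + 1)
        else (a :: st, ans, cntm, j)
      | none => (a :: st, ans, cntm, j)   -- Python raises IndexError here; excluded by Pre_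
    else (a :: st, ans, cntm, j)

-- one iteration of A's 'for i in range(1, n+1)' body, state = (st, answer, cntp, cntm, j)
def stepA (prog : List Int) (n : Int) (s : List Int × List String × Int × Int × Int) (i : Int) :
    List Int × List String × Int × Int × Int :=
  let (st, ans, cntp, cntm, j) := s
  let (st', ans', cntm', j') := popA prog n st ans cntm j
  (i :: st', ans' ++ ["+"], cntp + 1, cntm', j')

-- A's code after the for-loop: the final drain while, then the cntm == cntp comparison
def tailA (prog : List Int) (n : Int) (s : List Int × List String × Int × Int × Int) : List String :=
  let (st, ans, cntp, cntm, j) := s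
  let (_, ans', cntm', _) := popA prog n st ans cntm j
  if cntm' = cntp then ans' else []

def solution (n : Int) (prog : List Int) : List String :=
  tailA prog n ((PySem.List.pyRange 1 (n + 1) 1).foldl (stepA prog n) ([], [], 0, 0, 0))

-- ===== PORT B =====
-- B's 'for j in range(n)' loop, state = (seen : python set, m = running max, answer)
def loopB (n : Int) (prog : List Int) : List Int → PySem.Set Int → Int → List String → List String
  | [], _, _, ans => ans
  | j :: js, seen, m, ans =>
    match PySem.List.pyGet? prog j with
    | none => []   -- Python raises IndexError here; excluded by Pre_
    | some t =>
      if t < 1 ∨ n < t ∨ t ∈ seen then []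
      else if (PySem.List.pyRange (t + 1) (m + 1) 1).any (fun v => decide (v ∉ seen)) then []
      else
        let seen' := PySem.Set.add seen t
        if m < t then loopB n prog js seen' t (ans ++ List.replicate (t - m).toNat "+" ++ ["-"])
        else loopB n prog js seen' m (ans ++ ["-"])

def solution_alt (n : Int) (prog : List Int) : List String :=
  loopB n prog (PySem.List.pyRange 0 n 1) PySem.Set.empty 0 []

-- ===== PRECONDITION & SPEC =====
-- Pre_ excludes inputs whose target list prog is shorter than n: there both A and B can raise
-- IndexError mid-simulation, and whether they do depends on how far the matching proceeds, which is
-- not a closed-form condition on the input (on the excluded inputs where A does return, B returns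
-- the same value, e.g. (2, [5])).
def Pre_solution (n : Int) (prog : List Int) : Prop := n ≤ (prog.length : Int)
instance (n : Int) (prog : List Int) : Decidable (Pre_solution n prog) := by unfold Pre_solution; infer_instance
def pvWitness_solution : Int × List Int := (3, [2, 1, 3])

def Spec_solution (n : Int) (prog : List Int) (out : List String) : Prop := out = solution_alt n prog
instance (n : Int) (prog : List Int) (out : List String) : Decidable (Spec_solution n prog out) := by unfold Spec_solution; infer_instance

-- ===== CLAIM (what is proved, stated in full; the proofs are below) =====
def Claim_equal_solution : Prop := ∀ (n : Int) (prog : List Int), Dom_solution n prog → Pre_solution n prog → Spec_solution n prog (solution n prog)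

-- ===== LEMMAS AND PROOFS =====

-- Proof-side model of the greedy stack simulation, coupled to A below (popSim/loopSim) and to B
-- at the end (bridge): a lazy-push stack loop over the targets.
def pushS (n t : Int) (cur : Int) (st : List Int) (ans : List String) : Int × List Int × List String :=
  if cur ≤ n ∧ st.head? ≠ some t then
    pushS n t (cur + 1) (cur :: st) (ans ++ ["+"])
  else (cur, st, ans)
termination_by (n + 1 - cur).toNat
decreasing_by omega

def loopS (n : Int) (prog : List Int) : List Int → Int → List Int → List String → List String
  | [], _, _, ans => ans
  | j :: js, cur, st, ans =>
    match PySem.List.pyGet? prog j with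
    | none => []
    | some t =>
      let (cur', st', ans') := pushS n t cur st ans
      match st' with
      | u :: rest => if u = t then loopS n prog js cur' rest (ans' ++ ["-"]) else []
      | [] => []

-- blockL a b = [a, a-1, ..., b] (empty if a < b): the values A has pushed that S has not yet pushed
def blockL (a b : Int) : List Int :=
  if b ≤ a then a :: blockL (a - 1) b else []
termination_by (a + 1 - b).toNat
decreasing_by omega

theorem blockL_eq_nil {a b : Int} (h : a < b) : blockL a b = [] := by
  rw [blockL]; simp [show ¬ b ≤ a by omega]

theorem blockL_cons {a b : Int} (h : b ≤ a) : blockL a b = a :: blockL (a - 1) b := by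
  rw [blockL]; simp [h]

theorem length_blockL : ∀ (k : Nat) (a b : Int), (a + 1 - b).toNat = k → (blockL a b).length = k := by
  intro k
  induction k with
  | zero => intro a b h; rw [blockL_eq_nil (by omega)]; rfl
  | succ m ih =>
    intro a b h
    rw [blockL_cons (by omega)]
    simp [ih (a - 1) b (by omega)]

theorem mem_blockL : ∀ (k : Nat) (a b x : Int), (a + 1 - b).toNat = k → x ∈ blockL a b → b ≤ x ∧ x ≤ a := by
  intro k
  induction k with
  | zero => intro a b x h hm; rw [blockL_eq_nil (by omega)] at hm; simp at hm
  | succ m ih =>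
    intro a b x h hm
    rw [blockL_cons (by omega)] at hm
    rcases List.mem_cons.mp hm with rfl | hm
    · omega
    · have := ih (a - 1) b x (by omega) hm; omega

theorem mem_blockL_rev : ∀ (k : Nat) (a b x : Int), (a + 1 - b).toNat = k → b ≤ x → x ≤ a → x ∈ blockL a b := by
  intro k
  induction k with
  | zero => intro a b x h h1 h2; omega
  | succ m ih =>
    intro a b x h h1 h2
    rw [blockL_cons (by omega)]
    rcases eq_or_lt_of_le h2 with rfl | hlt
    · exact List.mem_cons_self
    · exact List.mem_cons_of_mem _ (ih (a - 1) b x (by omega) h1 (by omega))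

theorem mem_blockL_iff (a b x : Int) : x ∈ blockL a b ↔ b ≤ x ∧ x ≤ a :=
  ⟨mem_blockL (a + 1 - b).toNat a b x rfl,
   fun h => mem_blockL_rev (a + 1 - b).toNat a b x rfl h.1 h.2⟩

theorem pairwise_blockL : ∀ (k : Nat) (a b : Int), (a + 1 - b).toNat = k → (blockL a b).Pairwise (· > ·) := by
  intro k
  induction k with
  | zero => intro a b h; rw [blockL_eq_nil (by omega)]; exact List.Pairwise.nil
  | succ m ih =>
    intro a b h
    rw [blockL_cons (by omega)]
    refine List.Pairwise.cons ?_ (ih (a - 1) b (by omega))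
    intro x hx
    have := mem_blockL (a - 1 + 1 - b).toNat (a - 1) b x rfl hx
    omega

theorem blockL_append_last : ∀ (k : Nat) (a b : Int), (a - b).toNat = k → b ≤ a →
    blockL a b = blockL a (b + 1) ++ [b] := by
  intro k
  induction k with
  | zero =>
    intro a b h hb
    have : a = b := by omega
    subst this
    rw [blockL_cons le_rfl, blockL_eq_nil (by omega), blockL_eq_nil (by omega)]
    rfl
  | succ m ih =>
    intro a b h hb
    rw [blockL_cons hb, blockL_cons (by omega : b + 1 ≤ a), ih (a - 1) b (by omega) (by omega)]
    rfl

-- The coupling invariant between A's state at the start of iteration i of the outer for-loop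
-- (stack stA, answer ansA, cntm = j targets already popped) and S's state after it has consumed
-- its first j targets (stack stB, next-to-push counter cur, answer ansB).
def StInv (n : Int) (prog : List Int) (i j cur : Int)
    (stA : List Int) (ansA : List String) (stB : List Int) (ansB : List String) : Prop :=
  stA = blockL (i - 1) cur ++ stB ∧
  ansA = ansB ++ List.replicate (i - cur).toNat "+" ∧
  1 ≤ cur ∧ cur ≤ i ∧
  0 ≤ j ∧ j ≤ n ∧
  (stB.length : Int) = cur - 1 - j ∧
  (∀ x ∈ stB, x < cur) ∧
  (j < n → ∀ t, PySem.List.pyGet? prog j = some t →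
      ¬(cur ≤ t ∧ t ≤ i - 2) ∧ (cur < i → stB.head? ≠ some t))

theorem pyGet?_in (prog : List Int) (n j : Int) (hn : n ≤ (prog.length : Int))
    (h0 : 0 ≤ j) (hj : j < n) : ∃ t, PySem.List.pyGet? prog j = some t := by
  exact ⟨prog[j.toNat], PySem.List.pyGet?_eq_some_getElem prog h0 (by omega)⟩

-- S's push-while pushes exactly cur..t and stops with t on top (cur ≤ t ≤ n, stack tops too small)
theorem pushBlock (n t : Int) (ht : t ≤ n) :
    ∀ (k : Nat) (cur : Int) (st : List Int) (ans : List String), (t - cur).toNat = k →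
    cur ≤ t → (∀ x ∈ st, x < cur) →
    pushS n t cur st ans = (t + 1, blockL t cur ++ st, ans ++ List.replicate (t + 1 - cur).toNat "+") := by
  intro k
  induction k with
  | zero =>
    intro cur st ans hk hc hst
    have hct : cur = t := by omega
    subst hct
    rw [pushS]
    have hhd : st.head? ≠ some cur := by
      cases st with
      | nil => simp
      | cons a s => have := hst a (by simp); simp; omega
    rw [if_pos ⟨by omega, hhd⟩, pushS]
    have hhd2 : ¬((cur : Int) + 1 ≤ n ∧ (cur :: st).head? ≠ some cur) := by simp
    rw [if_neg hhd2]
    rw [blockL_cons le_rfl, blockL_eq_nil (by omega)]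
    simp
  | succ m ih =>
    intro cur st ans hk hc hst
    rw [pushS]
    have hhd : st.head? ≠ some t := by
      cases st with
      | nil => simp
      | cons a s => have := hst a (by simp); simp; omega
    rw [if_pos ⟨by omega, hhd⟩]
    have harg : ∀ x ∈ cur :: st, x < cur + 1 := by
      intro x hx
      rcases List.mem_cons.mp hx with rfl | hx2
      · omega
      · have := hst x hx2; omega
    rw [ih (cur + 1) (cur :: st) (ans ++ ["+"]) (by omega) (by omega) harg]
    rw [blockL_append_last (t - cur).toNat t cur rfl hc]
    have h1 : (t + 1 - (cur + 1)).toNat + 1 = (t + 1 - cur).toNat := by omega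
    simp only [List.append_assoc, List.singleton_append, ← h1, List.replicate_succ]

-- when t is nowhere among the tops S will see, the push-while ends without t on top
theorem pushNoMatch (n t : Int) :
    ∀ (k : Nat) (cur : Int) (st : List Int) (ans : List String), (n + 1 - cur).toNat = k →
    ¬(cur ≤ t ∧ t ≤ n) → st.head? ≠ some t →
    (pushS n t cur st ans).2.1.head? ≠ some t := by
  intro k
  induction k with
  | zero =>
    intro cur st ans hk hrange hhd
    rw [pushS, if_neg (by simp [hhd]; omega)]
    exact hhd
  | succ m ih =>
    intro cur st ans hk hrange hhd
    rw [pushS]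
    by_cases hc : cur ≤ n ∧ st.head? ≠ some t
    · rw [if_pos hc]
      exact ih (cur + 1) (cur :: st) (ans ++ ["+"]) (by omega) (by omega)
        (by simp; omega)
    · rw [if_neg hc]
      exact hhd

-- simulation of A's inner pop-while by S consuming targets
theorem popSim (n : Int) (prog : List Int) (hn : n ≤ (prog.length : Int)) (i : Int) (hi : i ≤ n + 1) :
    ∀ (stA : List Int) (ansA : List String) (j cur : Int) (stB : List Int) (ansB : List String),
    StInv n prog i j cur stA ansA stB ansB →
    ∃ (j' cur' : Int) (stA' stB' : List Int) (ansA' ansB' : List String),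
      popA prog n stA ansA j j = (stA', ansA', j', j') ∧
      StInv n prog i j' cur' stA' ansA' stB' ansB' ∧
      (j' < n → ∀ t, PySem.List.pyGet? prog j' = some t → stA'.head? ≠ some t) ∧
      loopS n prog (PySem.List.pyRange j n 1) cur stB ansB =
        loopS n prog (PySem.List.pyRange j' n 1) cur' stB' ansB' := by
  intro stA
  induction stA with
  | nil =>
    intro ansA j cur stB ansB hInv
    refine ⟨j, cur, [], stB, ansA, ansB, by rw [popA], hInv, ?_, rfl⟩
    intro _ t _
    simp
  | cons a rest ih =>
    intro ansA j cur stB ansB hInv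
    obtain ⟨h1, h2, h3, h4, h5, h6, h7, h8, h9⟩ := hInv
    by_cases hj : j < n
    · obtain ⟨t, ht⟩ := pyGet?_in prog n j hn h5 hj
      by_cases hpa : t = a
      · -- A pops; S consumes target j
        subst hpa
        by_cases hcur : cur < i
        · -- block nonempty: a = i-1, S pushes the whole block then pops
          rw [blockL_cons (by omega : cur ≤ i - 1)] at h1
          have ha : t = i - 1 := by
            have := congrArg List.head? h1; simpa using this
          have hrest : rest = blockL (i - 2) cur ++ stB := by
            have := congrArg List.tail h1
            simpa [show (i : Int) - 1 - 1 = i - 2 by omega] using this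
          have hInv2 : StInv n prog i (j + 1) i rest (ansA ++ ["-"]) rest (ansA ++ ["-"]) := by
            refine ⟨by simp [blockL_eq_nil (show (i:Int) - 1 < i by omega)], by simp, by omega, le_rfl,
              by omega, by omega, ?_, ?_, ?_⟩
            · rw [hrest]
              have hlb := length_blockL (i - 1 - cur).toNat (i - 2) cur (by omega)
              simp [hlb]
              omega
            · intro x hx
              rw [hrest] at hx
              rcases List.mem_append.mp hx with hx | hx
              · have := mem_blockL (i - 1 - cur).toNat (i - 2) cur x (by omega) hx; omega
              · have := h8 x hx; omega
            · intro _ t' _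
              constructor
              · omega
              · omega
          obtain ⟨j', cur', stA', stB', ansA', ansB', hpop, hInv', hexit, hloop⟩ :=
            ih (ansA ++ ["-"]) (j + 1) i rest (ansA ++ ["-"]) hInv2
          refine ⟨j', cur', stA', stB', ansA', ansB', ?_, hInv', hexit, ?_⟩
          · simp only [popA, ht, if_pos hj]
            simpa using hpop
          · rw [PySem.List.pyRange_one_cons hj]
            have hpush := pushBlock n t (by omega) (t - cur).toNat cur stB ansB rfl (by omega) h8
            have hst' : blockL t cur ++ stB = t :: rest := by
              rw [ha, blockL_cons (by omega : cur ≤ i - 1), hrest]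
              simp [show (i : Int) - 1 - 1 = i - 2 by omega]
            have hans : ansB ++ List.replicate (t + 1 - cur).toNat "+" = ansA := by
              rw [ha, show (i : Int) - 1 + 1 - cur = i - cur by omega]
              exact h2.symm
            have hti : t + 1 = i := by omega
            simp only [loopS, ht, hpush, hst']
            rw [if_pos trivial, hans, hti]
            exact hloop
        · -- block empty: cur = i, a is S's own stack top
          have hci : cur = i := by omega
          have hstB : stB = t :: rest := by
            rw [blockL_eq_nil (by omega : (i:Int) - 1 < cur)] at h1
            simpa using h1.symm
          have hansB : ansA = ansB := by
            simpa [show (i - cur).toNat = 0 by omega] using h2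
          have hInv2 : StInv n prog i (j + 1) cur rest (ansA ++ ["-"]) rest (ansB ++ ["-"]) := by
            refine ⟨by simp [blockL_eq_nil (show (i:Int) - 1 < cur by omega)], by simp [hansB, show (i - cur).toNat = 0 by omega], h3, h4,
              by omega, by omega, ?_, ?_, ?_⟩
            · have : stB.length = rest.length + 1 := by rw [hstB]; rfl
              omega
            · intro x hx
              exact h8 x (by rw [hstB]; exact List.mem_cons_of_mem t hx)
            · intro _ t' _
              constructor
              · omega
              · omega
          obtain ⟨j', cur', stA', stB', ansA', ansB', hpop, hInv', hexit, hloop⟩ :=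
            ih (ansA ++ ["-"]) (j + 1) cur rest (ansB ++ ["-"]) hInv2
          refine ⟨j', cur', stA', stB', ansA', ansB', ?_, hInv', hexit, ?_⟩
          · simp only [popA, ht, if_pos hj]
            simpa using hpop
          · rw [PySem.List.pyRange_one_cons hj]
            have hpb : pushS n t cur (t :: rest) ansB = (cur, t :: rest, ansB) := by
              rw [pushS, if_neg (by simp)]
            simp only [loopS, ht, hstB, hpb, if_true]
            exact hloop
      · -- mismatch: A's while exits here; S unchanged
        refine ⟨j, cur, a :: rest, stB, ansA, ansB, ?_, ⟨h1, h2, h3, h4, h5, h6, h7, h8, h9⟩, ?_, rfl⟩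
        · simp [popA, ht, hpa]
        · intro _ t' ht'
          rw [ht] at ht'
          obtain rfl : t = t' := Option.some.inj ht'
          simp only [List.head?_cons, ne_eq, Option.some.injEq]
          exact fun h => hpa h.symm
    · -- j = n: A's while exits
      refine ⟨j, cur, a :: rest, stB, ansA, ansB, ?_, ⟨h1, h2, h3, h4, h5, h6, h7, h8, h9⟩, ?_, rfl⟩
      · rw [popA, if_neg hj]
      · intro hcon; omega

-- simulation of the rest of A's run (outer loop from i, drain, compare) by S's remaining targets
theorem loopSim (n : Int) (prog : List Int) (hn : n ≤ (prog.length : Int)) :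
    ∀ (k : Nat) (i : Int), (n + 1 - i).toNat = k → 1 ≤ i → i ≤ n + 1 →
    ∀ (stA : List Int) (ansA : List String) (j cur : Int) (stB : List Int) (ansB : List String),
    StInv n prog i j cur stA ansA stB ansB →
    tailA prog n ((PySem.List.pyRange i (n + 1) 1).foldl (stepA prog n) (stA, ansA, i - 1, j, j)) =
      loopS n prog (PySem.List.pyRange j n 1) cur stB ansB := by
  intro k
  induction k with
  | zero =>
    intro i hk hi1 hi2 stA ansA j cur stB ansB hInv
    have hieq : i = n + 1 := by omega
    subst hieq
    rw [PySem.List.pyRange_one_eq_nil le_rfl]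
    simp only [List.foldl_nil]
    obtain ⟨j', cur', stA', stB', ansA', ansB', hpop, hInv', hexit, hloop⟩ :=
      popSim n prog hn (n + 1) le_rfl stA ansA j cur stB ansB hInv
    obtain ⟨g1, g2, g3, g4, g5, g6, g7, g8, g9⟩ := hInv'
    simp only [tailA]
    rw [hpop]
    by_cases hj' : j' = n + 1 - 1
    · rw [if_pos hj']
      have hjn : j' = n := by omega
      have hcur' : cur' = n + 1 := by omega
      rw [hloop, hjn, PySem.List.pyRange_one_eq_nil le_rfl]
      simp only [loopS]
      rw [g2, show ((n:Int) + 1 - cur').toNat = 0 by omega]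
      simp
    · rw [if_neg hj']
      have hjlt : j' < n := by omega
      rw [hloop, PySem.List.pyRange_one_cons hjlt]
      obtain ⟨t, ht⟩ := pyGet?_in prog n j' hn g5 hjlt
      have hx := hexit hjlt t ht
      have hcases : ¬(cur' ≤ t ∧ t ≤ n) ∧ stB'.head? ≠ some t := by
        by_cases hcn : cur' ≤ n
        · have hb : stA' = n :: (blockL (n - 1) cur' ++ stB') := by
            rw [g1, show ((n:Int) + 1 - 1) = n by omega, blockL_cons (by omega : cur' ≤ n)]
            simp
          have htn : t ≠ n := by
            intro hEq
            apply hx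
            rw [hb, hEq]
            rfl
          have h9' := g9 hjlt t ht
          exact ⟨by omega, h9'.2 (by omega)⟩
        · have hb : stA' = stB' := by
            rw [g1, blockL_eq_nil (by omega)]
            rfl
          exact ⟨by omega, by rw [← hb]; exact hx⟩
      have hnm := pushNoMatch n t (n + 1 - cur').toNat cur' stB' ansB' rfl hcases.1 hcases.2
      rcases hps : pushS n t cur' stB' ansB' with ⟨c2, s2, a2⟩
      rw [hps] at hnm
      simp only [loopS, ht, hps]
      match s2, hnm with
      | [], _ => rfl
      | u :: r, hnm =>
        have : ¬ u = t := by simpa using hnm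
        simp [this]
  | succ m ih =>
    intro i hk hi1 hi2 stA ansA j cur stB ansB hInv
    have hilt : i < n + 1 := by omega
    rw [PySem.List.pyRange_one_cons hilt]
    simp only [List.foldl_cons]
    obtain ⟨j', cur', stA', stB', ansA', ansB', hpop, hInv', hexit, hloop⟩ :=
      popSim n prog hn i (by omega) stA ansA j cur stB ansB hInv
    obtain ⟨g1, g2, g3, g4, g5, g6, g7, g8, g9⟩ := hInv'
    have hstep : stepA prog n (stA, ansA, i - 1, j, j) i = (i :: stA', ansA' ++ ["+"], i - 1 + 1, j', j') := by
      simp only [stepA]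
      rw [hpop]
    rw [hstep, show (i : Int) - 1 + 1 = (i + 1) - 1 by omega]
    have hInv2 : StInv n prog (i + 1) j' cur' (i :: stA') (ansA' ++ ["+"]) stB' ansB' := by
      refine ⟨?_, ?_, g3, by omega, g5, g6, g7, g8, ?_⟩
      · rw [g1, blockL_cons (by omega : cur' ≤ i + 1 - 1)]
        simp [show ((i:Int) + 1 - 1) = i by omega]
      · rw [g2, show ((i:Int) + 1 - cur').toNat = (i - cur').toNat + 1 by omega, List.replicate_succ']
        simp
      · intro hj' t ht
        have h9' := g9 hj' t ht
        have hx := hexit hj' t ht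
        constructor
        · intro hcon
          rcases lt_or_ge t (i - 1) with hlt | hge
          · exact h9'.1 ⟨hcon.1, by omega⟩
          · have hti : t = i - 1 := by omega
            have hcc : cur' ≤ i - 1 := by omega
            apply hx
            rw [g1, blockL_cons hcc, hti]
            rfl
        · intro hci
          rcases lt_or_ge cur' i with hlt | hge
          · exact h9'.2 hlt
          · have : cur' = i := by omega
            rw [g1, blockL_eq_nil (by omega)] at hx
            exact hx
    rw [hloop]
    exact ih (i + 1) (by omega) (by omega) (by omega) (i :: stA') (ansA' ++ ["+"]) j' cur' stB' ansB' hInv2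

-- the stackless loop of B computes the same thing as the lazy stack loop S: the stack is always
-- the strictly decreasing list of the values in 1..m not yet popped (seen), and cur = m + 1
theorem bridge (n : Int) (prog : List Int) :
    ∀ (js : List Int) (seen : PySem.Set Int) (m : Int) (st : List Int) (ans : List String),
    0 ≤ m → m ≤ n →
    st.Pairwise (· > ·) →
    (∀ x : Int, x ∈ st ↔ 1 ≤ x ∧ x ≤ m ∧ x ∉ seen) →
    (∀ x ∈ seen, 1 ≤ x ∧ x ≤ m) →
    loopS n prog js (m + 1) st ans = loopB n prog js seen m ans := by
  intro js
  induction js with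
  | nil => intro seen m st ans _ _ _ _ _; rfl
  | cons j js ih =>
    intro seen m st ans hm0 hmn hpw hmem hseen
    cases hg : PySem.List.pyGet? prog j with
    | none => simp only [loopS, loopB, hg]
    | some t =>
      have hstlt : ∀ x ∈ st, x < m + 1 := by intro x hx; have := (hmem x).mp hx; omega
      by_cases h1 : t < 1 ∨ n < t ∨ t ∈ seen
      · -- B fails the first check; S's push loop can never put t on top
        have hhd : st.head? ≠ some t := by
          cases hst : st with
          | nil => simp
          | cons a r =>
            simp only [List.head?_cons, ne_eq, Option.some.injEq]
            intro hat
            subst hat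
            have hmm := (hmem a).mp (by rw [hst]; exact List.mem_cons_self)
            rcases h1 with h | h | h
            · omega
            · omega
            · exact hmm.2.2 h
        have hrange : ¬(m + 1 ≤ t ∧ t ≤ n) := by
          rcases h1 with h | h | h
          · omega
          · omega
          · have := hseen t h; omega
        have hnm := pushNoMatch n t (n + 1 - (m + 1)).toNat (m + 1) st ans rfl hrange hhd
        rcases hps : pushS n t (m + 1) st ans with ⟨c2, s2, a2⟩
        rw [hps] at hnm
        have hB : loopB n prog (j :: js) seen m ans = [] := by
          simp only [loopB, hg]
          rw [if_pos h1]
        rw [hB]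
        simp only [loopS, hg, hps]
        match s2, hnm with
        | [], _ => rfl
        | u :: r, hnm =>
          have : ¬ u = t := by simpa using hnm
          simp [this]
      · push_neg at h1
        obtain ⟨ht1, htn, hts⟩ := h1
        by_cases h2 : ∃ v : Int, (t + 1 ≤ v ∧ v < m + 1) ∧ v ∉ seen
        · -- B fails the interval check; again t never reaches S's stack top
          obtain ⟨v, ⟨hv1, hv2⟩, hvs⟩ := h2
          have hvst : v ∈ st := (hmem v).mpr ⟨by omega, by omega, hvs⟩
          have hhd : st.head? ≠ some t := by
            cases hst : st with
            | nil => rw [hst] at hvst; simp at hvst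
            | cons a r =>
              simp only [List.head?_cons, ne_eq, Option.some.injEq]
              intro hat
              subst hat
              rw [hst] at hvst hpw
              rcases List.mem_cons.mp hvst with rfl | hvr
              · omega
              · have := (List.pairwise_cons.mp hpw).1 v hvr
                omega
          have hrange : ¬(m + 1 ≤ t ∧ t ≤ n) := by omega
          have hnm := pushNoMatch n t (n + 1 - (m + 1)).toNat (m + 1) st ans rfl hrange hhd
          rcases hps : pushS n t (m + 1) st ans with ⟨c2, s2, a2⟩
          rw [hps] at hnm
          have hB : loopB n prog (j :: js) seen m ans = [] := by
            simp only [loopB, hg]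
            rw [if_neg (by push_neg; exact ⟨ht1, htn, hts⟩), if_pos (by
              simp only [List.any_eq_true, PySem.List.mem_pyRange_one, decide_eq_true_eq]
              exact ⟨v, ⟨hv1, hv2⟩, hvs⟩)]
          rw [hB]
          simp only [loopS, hg, hps]
          match s2, hnm with
          | [], _ => rfl
          | u :: r, hnm =>
            have : ¬ u = t := by simpa using hnm
            simp [this]
        · -- valid step
          have h2' : ∀ v : Int, t + 1 ≤ v → v < m + 1 → v ∈ seen := by
            intro v hv1 hv2
            by_contra hvs
            exact h2 ⟨v, ⟨hv1, hv2⟩, hvs⟩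
          have hBstep : loopB n prog (j :: js) seen m ans =
              (if m < t then loopB n prog js (PySem.Set.add seen t) t (ans ++ List.replicate (t - m).toNat "+" ++ ["-"])
               else loopB n prog js (PySem.Set.add seen t) m (ans ++ ["-"])) := by
            simp only [loopB, hg]
            rw [if_neg (by push_neg; exact ⟨ht1, htn, hts⟩), if_neg (by
              simp only [List.any_eq_true, PySem.List.mem_pyRange_one, decide_eq_true_eq, not_exists, not_and]
              intro v hv hvn
              exact absurd (h2' v hv.1 hv.2) hvn)]
          rw [hBstep]
          by_cases h3 : m < t
          · -- new maximum: S pushes the block m+1..t then pops t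
            rw [if_pos h3]
            have hpush := pushBlock n t htn (t - (m + 1)).toNat (m + 1) st ans rfl (by omega) hstlt
            rw [blockL_cons (by omega : m + 1 ≤ t)] at hpush
            simp only [loopS, hg, hpush, List.cons_append]
            have harr : ans ++ List.replicate (t + 1 - (m + 1)).toNat "+" ++ ["-"] =
                ans ++ List.replicate (t - m).toNat "+" ++ ["-"] := by
              rw [show (t + 1 - (m + 1)).toNat = (t - m).toNat by omega]
            rw [harr]
            refine ih (PySem.Set.add seen t) t (blockL (t - 1) (m + 1) ++ st) _ (by omega) htn ?_ ?_ ?_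
            · rw [List.pairwise_append]
              refine ⟨pairwise_blockL (t - 1 + 1 - (m + 1)).toNat (t - 1) (m + 1) rfl, hpw, ?_⟩
              intro x hx y hy
              have hxm := (mem_blockL_iff (t - 1) (m + 1) x).mp hx
              have hym := (hmem y).mp hy
              omega
            · intro x
              rw [List.mem_append, mem_blockL_iff, hmem x, PySem.Set.mem_add]
              constructor
              · rintro (⟨ha, hb⟩ | ⟨ha, hb, hc⟩)
                · refine ⟨by omega, by omega, ?_⟩
                  rintro (hx | rfl)
                  · have := hseen x hx; omega
                  · omega
                · refine ⟨ha, by omega, ?_⟩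
                  rintro (hx | rfl)
                  · exact hc hx
                  · omega
              · rintro ⟨ha, hb, hc⟩
                by_cases hxm : x ≤ m
                · exact Or.inr ⟨ha, hxm, fun hx => hc (Or.inl hx)⟩
                · refine Or.inl ⟨by omega, ?_⟩
                  rcases eq_or_lt_of_le hb with rfl | hlt
                  · exact absurd (Or.inr rfl) hc
                  · omega
            · intro x hx
              rcases (PySem.Set.mem_add _ _ _).mp hx with hx | rfl
              · have := hseen x hx; omega
              · omega
          · -- t ≤ m: t must be S's stack top; S pops it with no pushes
            rw [if_neg h3]
            have htst : t ∈ st := (hmem t).mpr ⟨ht1, by omega, hts⟩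
            obtain ⟨a, rest, hst⟩ : ∃ a rest, st = a :: rest := by
              cases st with
              | nil => simp at htst
              | cons a r => exact ⟨a, r, rfl⟩
            subst hst
            have hat : t = a := by
              by_contra hne
              have hmem_a := (hmem a).mp List.mem_cons_self
              have htr : t ∈ rest := by
                rcases List.mem_cons.mp htst with h | h
                · exact absurd h hne
                · exact h
              have hagt : a > t := (List.pairwise_cons.mp hpw).1 t htr
              have haseen : a ∈ seen := h2' a (by omega) (by omega)
              exact absurd haseen hmem_a.2.2
            subst hat
            have hps : pushS n t (m + 1) (t :: rest) ans = (m + 1, t :: rest, ans) := by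
              rw [pushS, if_neg (by simp)]
            simp only [loopS, hg, hps]
            refine ih (PySem.Set.add seen t) m rest _ hm0 hmn (hpw.of_cons) ?_ ?_
            · intro x
              have hxr := (List.pairwise_cons.mp hpw).1 x
              constructor
              · intro hx
                have := (hmem x).mp (List.mem_cons_of_mem t hx)
                refine ⟨this.1, this.2.1, ?_⟩
                rw [PySem.Set.mem_add]
                rintro (h | rfl)
                · exact this.2.2 h
                · have := hxr hx; omega
              · rintro ⟨ha, hb, hc⟩
                rw [PySem.Set.mem_add] at hc
                push_neg at hc
                have hxst := (hmem x).mpr ⟨ha, hb, hc.1⟩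
                rcases List.mem_cons.mp hxst with h | h
                · exact absurd h hc.2
                · exact h
            · intro x hx
              rcases (PySem.Set.mem_add _ _ _).mp hx with hx | rfl
              · exact hseen x hx
              · exact ⟨ht1, by omega⟩

-- ===== VERDICT (by name: the statement is the Claim_ definition above) =====
theorem solution_spec : Claim_equal_solution := by
  intro n prog _ hpre
  unfold Spec_solution solution solution_alt
  by_cases hn : 0 ≤ n
  · have hA := loopSim n prog hpre (n.toNat) 1 (by omega) le_rfl (by omega)
      [] [] 0 1 [] [] ?_
    · have hB := bridge n prog (PySem.List.pyRange 0 n 1) PySem.Set.empty 0 [] []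
        le_rfl hn (by simp) (by intro x; simp [PySem.Set.empty]; omega) (by intro x hx; simp [PySem.Set.empty] at hx)
      rw [show (0 : Int) + 1 = 1 by ring] at hB
      simpa using hA.trans hB
    · refine ⟨by simp [blockL_eq_nil (show (0:Int) < 1 by omega)], by simp, le_rfl, le_rfl, le_rfl, hn, by simp, by simp, ?_⟩
      intro hj t _
      constructor
      · omega
      · omega
  · rw [PySem.List.pyRange_one_eq_nil (by omega), PySem.List.pyRange_one_eq_nil (by omega)]
    simp [tailA, popA, loopB]
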